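-- pv_equiv track=rewrite | github.com/itsbth/technopolis-menu | main.py | parse_menu_simple
-- ===== SOURCE A (Python) =====
-- DAYS = ("mandag", "tirsdag", "onsdag", "torsdag", "fredag")
--
-- def parse_menu_simple(menu: str):
--     days = {}
--     menu = menu.split("\n\n")
--     day = None
--     for line in menu:
--         if line.lower() in DAYS:
--             day = line.lower()
--             days[day] = []
--         elif day and line:
--             days[day].append(line.strip())
--     return days
-- ===== SOURCE B (Python) =====
-- DAYS = ("mandag", "tirsdag", "onsdag", "torsdag", "fredag")
--
-- def parse_menu_simple(menu: str):
--     def is_day(s):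
--         return s.lower() in DAYS
--
--     def groups(segs):
--         # drop segments before the first day header
--         while segs and not is_day(segs[0]):
--             segs = segs[1:]
--         if not segs:
--             return []
--         head, rest = segs[0], segs[1:]
--         k = next((i for i, s in enumerate(rest) if is_day(s)), len(rest))
--         body = [s.strip() for s in rest[:k] if s]
--         return [(head.lower(), body)] + groups(rest[k:])
--
--     days = {}
--     for day, body in groups(menu.split("\n\n")):
--         days[day] = body
--     return days
-- ===== Notes on version B (the rewrite author's own statement) =====
-- stated objective: alternative
-- what changed: A is a single stateful pass that mutates the dict while tracking the current day; B first recursively cuts the segment list into (header, body-slice) groups and then assembles the dict from those groups in one fold.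
import Mathlib
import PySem

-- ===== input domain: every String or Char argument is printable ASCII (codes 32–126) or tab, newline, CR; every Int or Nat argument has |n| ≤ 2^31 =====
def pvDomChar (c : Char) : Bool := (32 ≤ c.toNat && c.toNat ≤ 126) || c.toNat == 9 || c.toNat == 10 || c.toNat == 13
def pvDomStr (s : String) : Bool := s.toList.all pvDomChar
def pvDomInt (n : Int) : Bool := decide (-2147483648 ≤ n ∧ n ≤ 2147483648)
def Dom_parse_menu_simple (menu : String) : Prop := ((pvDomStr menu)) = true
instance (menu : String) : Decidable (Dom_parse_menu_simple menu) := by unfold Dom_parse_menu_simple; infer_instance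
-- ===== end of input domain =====

-- B replaces A's single stateful accumulator loop by a recursive grouping pass followed by a dict-assembly fold (alternative decomposition, same cost).

def pvDays : List String := ["mandag", "tirsdag", "onsdag", "torsdag", "fredag"]

-- ===== PORT A =====
-- one loop iteration of A: state = (days, day)
def pvStepA (st : PySem.Dict String (List String) × Option String) (line : String) :
    PySem.Dict String (List String) × Option String :=
  if pvDays.contains (PySem.Str.lower line) then
    (st.1.insert (PySem.Str.lower line) [], some (PySem.Str.lower line))
  else
    match st.2 with
    | some day =>
        -- days[day].append(line.strip()): read days[day], append, store back
        -- (the key is always present when day is set, so the [] default is never used)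
        if day ≠ "" ∧ line ≠ "" then
          (st.1.insert day (st.1.getD day [] ++ [PySem.Str.strip line]), some day)
        else (st.1, some day)
    | none => (st.1, none)

def parse_menu_simple (menu : String) : List (String × List String) :=
  -- menu.split("\n\n"): sep ≠ "", so split? is never none
  ((((PySem.Str.split? menu "\n\n").getD []).foldl pvStepA (PySem.Dict.empty, none)).1).items

-- ===== PORT B =====
def pvIsDay (s : String) : Bool := pvDays.contains (PySem.Str.lower s)

-- B's `groups`: drop up to the first header, slice the body up to the next header, recurse
def pvGroups (segs : List String) : List (String × List String) :=
  if h : segs.dropWhile (fun s => !pvIsDay s) = [] then []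
  else
    let rest := (segs.dropWhile (fun s => !pvIsDay s)).tail
    let k := rest.findIdx pvIsDay
    (PySem.Str.lower (segs.dropWhile (fun s => !pvIsDay s)).headI,
      ((rest.take k).filter (fun s => s != "")).map PySem.Str.strip)
      :: pvGroups (rest.drop k)
termination_by segs.length
decreasing_by
  have h1 := List.length_dropWhile_le (fun s => !pvIsDay s) segs
  have h4 : (segs.dropWhile (fun s => !pvIsDay s)).length ≠ 0 := by
    simpa [List.length_eq_zero_iff] using h
  simp only [List.length_drop, List.length_tail]
  omega

def parse_menu_simple_alt (menu : String) : List (String × List String) :=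
  ((pvGroups ((PySem.Str.split? menu "\n\n").getD [])).foldl
      (fun d p => d.insert p.1 p.2)
      (PySem.Dict.empty : PySem.Dict String (List String))).items

-- ===== PRECONDITION & SPEC =====
def Spec_parse_menu_simple (menu : String) (out : List (String × List String)) : Prop := out = parse_menu_simple_alt menu
instance (menu : String) (out : List (String × List String)) : Decidable (Spec_parse_menu_simple menu out) := by unfold Spec_parse_menu_simple; infer_instance

-- ===== CLAIM (what is proved, stated in full; the proofs are below) =====
def Claim_equal_parse_menu_simple : Prop := ∀ (menu : String), Dom_parse_menu_simple menu → Spec_parse_menu_simple menu (parse_menu_simple menu)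

-- ===== LEMMAS AND PROOFS =====

-- one body-append step of A while the current day is k (ONLY used by the proofs)
def pvApp (k : String) (d : PySem.Dict String (List String)) (s : String) :
    PySem.Dict String (List String) :=
  if s ≠ "" then d.insert k (d.getD k [] ++ [PySem.Str.strip s]) else d

theorem pv_lower_ne_empty {s : String} (h : pvIsDay s = true) : PySem.Str.lower s ≠ "" := by
  unfold pvIsDay pvDays at h
  simp at h
  rcases h with h | h | h | h | h <;> rw [h] <;> decide

theorem pvApp_insert (l : List String) (d : PySem.Dict String (List String)) (h : String)
    (v : List String) :
    l.foldl (pvApp h) (d.insert h v)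
      = d.insert h (v ++ (l.filter (fun s => s != "")).map PySem.Str.strip) := by
  induction l generalizing v with
  | nil => simp
  | cons s l ih =>
      by_cases hs : s = ""
      · subst hs
        simpa [pvApp] using ih v
      · simp only [List.foldl_cons, pvApp, hs, if_pos, ne_eq, not_false_iff,
          PySem.Dict.getD_insert_self, PySem.Dict.insert_insert_self]
        rw [ih (v ++ [PySem.Str.strip s])]
        simp [hs]

theorem pvGroups_nil : pvGroups [] = [] := by rw [pvGroups.eq_def]; simp

theorem pvGroups_cons_neg {s : String} (l : List String) (hs : pvIsDay s = false) :
    pvGroups (s :: l) = pvGroups l := by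
  rw [pvGroups.eq_def]
  conv_rhs => rw [pvGroups.eq_def]
  simp [hs]

theorem pvGroups_cons_pos {s : String} (l : List String) (hs : pvIsDay s = true) :
    pvGroups (s :: l)
      = (PySem.Str.lower s,
          ((l.take (l.findIdx pvIsDay)).filter (fun s => s != "")).map PySem.Str.strip)
        :: pvGroups (l.drop (l.findIdx pvIsDay)) := by
  rw [pvGroups.eq_def]
  simp [hs]

theorem pvGroups_dropWhile (l : List String) :
    pvGroups (l.dropWhile (fun s => !pvIsDay s)) = pvGroups l := by
  induction l with
  | nil => rfl
  | cons s l ih =>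
      by_cases hs : pvIsDay s = true
      · simp [hs]
      · simp only [Bool.not_eq_true] at hs
        rw [List.dropWhile_cons_of_pos (by simp [hs]), ih, pvGroups_cons_neg l hs]

theorem pv_findIdx_not_not (l : List String) :
    l.findIdx (fun a => !(fun s => !pvIsDay s) a) = l.findIdx pvIsDay := by
  congr 1
  funext a
  simp

theorem pv_go2 (segs : List String) (d : PySem.Dict String (List String)) (k : String)
    (hk : k ≠ "") :
    (segs.foldl pvStepA (d, some k)).1
      = (pvGroups segs).foldl (fun d p => d.insert p.1 p.2)
          ((segs.takeWhile (fun s => !pvIsDay s)).foldl (pvApp k) d) := by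
  induction segs generalizing d k with
  | nil => simp [pvGroups_nil]
  | cons s rest ih =>
      by_cases hs : pvIsDay s = true
      · have hstep : pvStepA (d, some k) s
            = (d.insert (PySem.Str.lower s) [], some (PySem.Str.lower s)) := by
          simp [pvStepA, pvIsDay] at hs ⊢
          simp [hs]
        rw [List.foldl_cons, hstep, ih _ _ (pv_lower_ne_empty hs),
          pvApp_insert, pvGroups_cons_pos rest hs]
        rw [List.takeWhile_cons_of_neg (by simp [hs]), List.foldl_nil, List.foldl_cons]
        rw [← pvGroups_dropWhile rest, List.dropWhile_eq_drop_findIdx_not,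
          pv_findIdx_not_not]
        rw [List.takeWhile_eq_take_findIdx_not, pv_findIdx_not_not]
        simp
      · simp only [Bool.not_eq_true] at hs
        have hstep : pvStepA (d, some k) s = (pvApp k d s, some k) := by
          by_cases hempty : s = ""
          · subst hempty
            simp [pvStepA, pvIsDay, pvApp] at hs ⊢
            simp [hs]
          · simp [pvStepA, pvIsDay, pvApp] at hs ⊢
            simp [hs, hk, hempty]
        rw [List.foldl_cons, hstep, ih _ _ hk, pvGroups_cons_neg rest hs,
          List.takeWhile_cons_of_pos (by simp [hs]), List.foldl_cons]

theorem pv_go1 (segs : List String) (d : PySem.Dict String (List String)) :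
    (segs.foldl pvStepA (d, none)).1
      = (pvGroups segs).foldl (fun d p => d.insert p.1 p.2) d := by
  induction segs generalizing d with
  | nil => simp [pvGroups_nil]
  | cons s rest ih =>
      by_cases hs : pvIsDay s = true
      · have hstep : pvStepA (d, none) s
            = (d.insert (PySem.Str.lower s) [], some (PySem.Str.lower s)) := by
          simp [pvStepA, pvIsDay] at hs ⊢
          simp [hs]
        rw [List.foldl_cons, hstep, pv_go2 _ _ _ (pv_lower_ne_empty hs),
          pvApp_insert, pvGroups_cons_pos rest hs, List.foldl_cons]
        rw [← pvGroups_dropWhile rest, List.dropWhile_eq_drop_findIdx_not,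
          pv_findIdx_not_not]
        rw [List.takeWhile_eq_take_findIdx_not, pv_findIdx_not_not]
        simp
      · simp only [Bool.not_eq_true] at hs
        have hstep : pvStepA (d, none) s = (d, none) := by
          simp [pvStepA, pvIsDay] at hs ⊢
          simp [hs]
        rw [List.foldl_cons, hstep, ih, pvGroups_cons_neg rest hs]

-- ===== VERDICT (by name: the statement is the Claim_ definition above) =====
theorem parse_menu_simple_spec : Claim_equal_parse_menu_simple := by
  intro menu _
  unfold Spec_parse_menu_simple parse_menu_simple parse_menu_simple_alt
  rw [pv_go1]
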